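-- pv_equiv track=rewrite | github.com/jsggo2001/codingtest | 페이업/조합 구해서 합계 기준 이상 가져오기.py | solution
-- ===== SOURCE A (Python) =====
-- from itertools import combinations
--
-- def solution(arr, k, t):
--     answer = 0
--     lst = []
--     for i in range(k,len(arr)+1):
--         lst.extend(list(combinations(arr, i)))
--     for i in lst:
--         if sum(i) <= t:
--             answer += 1
--     return answer
-- ===== SOURCE B (Python) =====
-- def solution(arr, k, t):
--     # Count, by direct branch recursion over the list, the subsets with at
--     # least k elements and sum at most t; no combination tuples are built.
--     def count(rest, need, budget):
--         if not rest:
--             return 1 if need <= 0 and budget >= 0 else 0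
--         x = rest[0]
--         return count(rest[1:], need, budget) + count(rest[1:], need - 1, budget - x)
--     return count(list(arr), k, t)
-- ===== Notes on version B (the rewrite author's own statement) =====
-- stated objective: alternative
-- what changed: B replaces A's two-phase enumeration (materialise every combination tuple of each size >= k via itertools, then filter by sum) with a direct take/skip branch recursion that counts subsets with >= k elements and sum <= t without building any tuples or lists.
import Mathlib
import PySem

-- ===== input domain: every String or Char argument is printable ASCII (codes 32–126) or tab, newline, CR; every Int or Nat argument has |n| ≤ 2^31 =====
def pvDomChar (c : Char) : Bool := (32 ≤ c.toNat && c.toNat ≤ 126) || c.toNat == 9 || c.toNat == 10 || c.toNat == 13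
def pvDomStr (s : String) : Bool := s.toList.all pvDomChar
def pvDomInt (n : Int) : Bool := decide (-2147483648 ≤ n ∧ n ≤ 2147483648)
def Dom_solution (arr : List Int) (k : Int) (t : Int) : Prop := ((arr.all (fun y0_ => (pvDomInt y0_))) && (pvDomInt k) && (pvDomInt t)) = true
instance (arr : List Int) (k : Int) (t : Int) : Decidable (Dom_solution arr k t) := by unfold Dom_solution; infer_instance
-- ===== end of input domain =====

-- B replaces A's materialisation of every combination tuple with a direct
-- take/skip branch recursion that only counts (objective: alternative).

-- ===== PORT A =====
def solution (arr : List Int) (k : Int) (t : Int) : Int :=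
  -- lst = []; for i in range(k, len(arr)+1): lst.extend(list(combinations(arr, i)))
  let lst : List (List Int) :=
    (PySem.List.pyRange k ((arr.length : Int) + 1) 1).foldl
      (fun acc i => acc ++ PySem.List.combinations arr i.toNat) []
  -- answer = 0; for c in lst: if sum(c) <= t: answer += 1
  lst.foldl (fun answer c => if c.sum ≤ t then answer + 1 else answer) 0

-- ===== PORT B =====
-- count(rest, need, budget): subsets of rest with ≥ need elements and sum ≤ budget
def countRec (rest : List Int) (need budget : Int) : Int :=
  match rest with
  | [] => if need ≤ 0 ∧ 0 ≤ budget then 1 else 0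
  | x :: r => countRec r need budget + countRec r (need - 1) (budget - x)

def solution_alt (arr : List Int) (k : Int) (t : Int) : Int :=
  countRec arr k t

-- ===== PRECONDITION & SPEC =====
-- Pre_ excludes k < 0, where Python's combinations(arr, i) raises ValueError
-- ("r must be non-negative"); B's recursion would return the count of all subsets
-- of arr with sum ≤ t there.
def Pre_solution (arr : List Int) (k : Int) (t : Int) : Prop := 0 ≤ k
instance (arr : List Int) (k : Int) (t : Int) : Decidable (Pre_solution arr k t) := by unfold Pre_solution; infer_instance
def pvWitness_solution : List Int × Int × Int := ([1, 2], 1, 3)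


def Spec_solution (arr : List Int) (k : Int) (t : Int) (out : Int) : Prop := out = solution_alt arr k t
instance (arr : List Int) (k : Int) (t : Int) (out : Int) : Decidable (Spec_solution arr k t out) := by unfold Spec_solution; infer_instance

-- ===== CLAIM (what is proved, stated in full; the proofs are below) =====
def Claim_equal_solution : Prop := ∀ (arr : List Int) (k : Int) (t : Int), Dom_solution arr k t → Pre_solution arr k t → Spec_solution arr k t (solution arr k t)

-- ===== LEMMAS AND PROOFS =====

-- B counts the sublists of rest with length ≥ need and sum ≤ budget.
theorem countRec_eq_countP (rest : List Int) (need budget : Int) :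
    countRec rest need budget
      = ((rest.sublists'.countP
            (fun S => decide (need ≤ (S.length : Int) ∧ S.sum ≤ budget)) : Nat) : Int) := by
  induction rest generalizing need budget with
  | nil => simp [countRec]
  | cons x r ih =>
      rw [countRec, ih, ih, List.sublists'_cons, List.countP_append, List.countP_map]
      have hc : r.sublists'.countP
            ((fun S => decide (need ≤ (S.length : Int) ∧ S.sum ≤ budget)) ∘ (List.cons x))
          = r.sublists'.countP
            (fun S => decide (need - 1 ≤ (S.length : Int) ∧ S.sum ≤ budget - x)) := by
        apply List.countP_congr
        intro S _
        simp only [Function.comp, List.length_cons, List.sum_cons, decide_eq_true_eq]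
        push_cast
        constructor <;> intro h <;> exact ⟨by omega, by omega⟩
      rw [hc]
      push_cast
      ring

-- The combinations of xs of size i are exactly the sublists of xs of length i,
-- as far as any count is concerned.
theorem countP_combinations (xs : List Int) (i : Nat) (t : Int) :
    (PySem.List.combinations xs i).countP (fun c => decide (c.sum ≤ t))
      = xs.sublists'.countP (fun S => decide (S.length = i ∧ S.sum ≤ t)) := by
  induction xs generalizing i t with
  | nil =>
      cases i with
      | zero => simp [PySem.List.combinations_zero]
      | succ j => simp [PySem.List.combinations_nil_succ]
  | cons x r ih =>
      cases i with
      | zero =>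
          rw [PySem.List.combinations_zero, List.sublists'_cons, List.countP_append,
            List.countP_map]
          have h0 : r.sublists'.countP
                ((fun S => decide (S.length = 0 ∧ S.sum ≤ t)) ∘ (List.cons x)) = 0 := by
            apply List.countP_eq_zero.mpr
            intro S _
            simp
          rw [h0, Nat.add_zero, ← PySem.List.combinations_zero (α := Int) (xs := r), ih]
      | succ j =>
          rw [PySem.List.combinations_cons_succ, List.sublists'_cons,
            List.countP_append, List.countP_append, List.countP_map, List.countP_map]
          have e1 : (PySem.List.combinations r j).countP
                ((fun c => decide (c.sum ≤ t)) ∘ (fun c => x :: c))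
              = r.sublists'.countP
                ((fun S => decide (S.length = j + 1 ∧ S.sum ≤ t)) ∘ (List.cons x)) := by
            have ha : (PySem.List.combinations r j).countP
                  ((fun c => decide (c.sum ≤ t)) ∘ (fun c => x :: c))
                = (PySem.List.combinations r j).countP (fun c => decide (c.sum ≤ t - x)) := by
              apply List.countP_congr
              intro c _
              simp only [Function.comp, List.sum_cons, decide_eq_true_eq]
              omega
            have hb : r.sublists'.countP
                  ((fun S => decide (S.length = j + 1 ∧ S.sum ≤ t)) ∘ (List.cons x))
                = r.sublists'.countP (fun S => decide (S.length = j ∧ S.sum ≤ t - x)) := by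
              apply List.countP_congr
              intro S _
              simp only [Function.comp, List.length_cons, List.sum_cons, decide_eq_true_eq]
              omega
            rw [ha, hb, ih j (t - x)]
          have e2 := ih (j + 1) t
          omega

-- Over range(k, n+1) the indicator "len(S) = i" sums to the indicator "k ≤ len(S)".
theorem indicator_sum (n : Nat) (k t : Int) (hk : 0 ≤ k) (S : List Int) (hS : S.length ≤ n) :
    ((PySem.List.pyRange k ((n : Int) + 1) 1).map
        (fun i => if S.length = i.toNat ∧ S.sum ≤ t then (1 : Int) else 0)).sum
      = if k ≤ (S.length : Int) ∧ S.sum ≤ t then 1 else 0 := by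
  by_cases hs : S.sum ≤ t
  · simp only [hs, and_true]
    have h0 := PySem.List.sum_map_ite_one_zero
      (p := fun i : Int => decide (S.length = i.toNat)) (PySem.List.pyRange k ((n : Int) + 1) 1)
    simp only [decide_eq_true_eq] at h0
    rw [h0]
    have h1 : (PySem.List.pyRange k ((n : Int) + 1) 1).countP
          (fun i => decide (S.length = i.toNat))
        = (PySem.List.pyRange k ((n : Int) + 1) 1).count ((S.length : Int)) := by
      rw [List.count_eq_countP]
      apply List.countP_congr
      intro i hi
      have hmem := PySem.List.mem_pyRange_one.mp hi
      simp only [decide_eq_true_eq, beq_iff_eq]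
      omega
    rw [h1]
    by_cases hm : (S.length : Int) ∈ PySem.List.pyRange k ((n : Int) + 1) 1
    · rw [List.count_eq_one_of_mem (PySem.List.nodup_pyRange_one _ _) hm]
      have := PySem.List.mem_pyRange_one.mp hm
      simp [this.1]
    · rw [List.count_eq_zero.mpr hm]
      have : ¬ k ≤ (S.length : Int) := by
        intro hkl
        exact hm (PySem.List.mem_pyRange_one.mpr ⟨hkl, by omega⟩)
      simp [this]
  · simp [hs]

-- Summing the per-size counts over range(k, n+1) gives the count of length ≥ k.
theorem sum_counts_gen (n : Nat) (k t : Int) (hk : 0 ≤ k) (L : List (List Int))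
    (hlen : ∀ X ∈ L, X.length ≤ n) :
    ((PySem.List.pyRange k ((n : Int) + 1) 1).map
        (fun i => ((L.countP (fun X => decide (X.length = i.toNat ∧ X.sum ≤ t)) : Nat) : Int))).sum
      = ((L.countP (fun X => decide (k ≤ (X.length : Int) ∧ X.sum ≤ t)) : Nat) : Int) := by
  induction L with
  | nil => simp
  | cons S L ihL =>
      have hSn : S.length ≤ n := hlen S (List.mem_cons_self ..)
      have hlen' : ∀ X ∈ L, X.length ≤ n := fun X hX => hlen X (List.mem_cons_of_mem _ hX)
      have hmap : (PySem.List.pyRange k ((n : Int) + 1) 1).map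
            (fun i => (((S :: L).countP
                (fun X => decide (X.length = i.toNat ∧ X.sum ≤ t)) : Nat) : Int))
          = (PySem.List.pyRange k ((n : Int) + 1) 1).map
            (fun i => ((L.countP (fun X => decide (X.length = i.toNat ∧ X.sum ≤ t)) : Nat) : Int)
              + if S.length = i.toNat ∧ S.sum ≤ t then (1 : Int) else 0) := by
        apply List.map_congr_left
        intro i _
        rw [List.countP_cons]
        by_cases h : S.length = i.toNat ∧ S.sum ≤ t <;> simp [h]
      rw [hmap, PySem.List.sum_map_add_int, ihL hlen', indicator_sum n k t hk S hSn,
        List.countP_cons]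
      by_cases h : k ≤ (S.length : Int) ∧ S.sum ≤ t <;> simp [h]

theorem sum_range_counts (arr : List Int) (k t : Int) (hk : 0 ≤ k) :
    ((PySem.List.pyRange k ((arr.length : Int) + 1) 1).map
        (fun i => (((PySem.List.combinations arr i.toNat).countP
            (fun c => decide (c.sum ≤ t)) : Nat) : Int))).sum
      = ((arr.sublists'.countP
            (fun S => decide (k ≤ (S.length : Int) ∧ S.sum ≤ t)) : Nat) : Int) := by
  have hmap : (PySem.List.pyRange k ((arr.length : Int) + 1) 1).map
        (fun i => (((PySem.List.combinations arr i.toNat).countP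
            (fun c => decide (c.sum ≤ t)) : Nat) : Int))
      = (PySem.List.pyRange k ((arr.length : Int) + 1) 1).map
        (fun i => ((arr.sublists'.countP
            (fun S => decide (S.length = i.toNat ∧ S.sum ≤ t)) : Nat) : Int)) := by
    apply List.map_congr_left
    intro i _
    rw [countP_combinations]
  rw [hmap]
  exact sum_counts_gen arr.length k t hk arr.sublists'
    (fun X hX => (List.mem_sublists'.mp hX).length_le)

-- ===== VERDICT (by name: the statement is the Claim_ definition above) =====
theorem solution_spec : Claim_equal_solution := by
  intro arr k t _ hk
  unfold Spec_solution solution solution_alt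
  rw [PySem.List.foldl_append_eq_flatMap, List.nil_append, PySem.List.foldl_ite_add_one,
    zero_add, List.countP_flatMap, Nat.cast_list_sum, List.map_map]
  exact ((sum_range_counts arr k t hk).trans (countRec_eq_countP arr k t).symm)
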